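-- pv_equiv track=rewrite | github.com/mathiashatlestad/aoc2024 | 2024/20_race_condition/aoc202420.py | bfs_ignore_walls_limited
-- ===== SOURCE A (Python) =====
-- from collections import deque
--
-- DIRECTIONS = [
--     (0, 1),   # down
--     (0, -1),  # up
--     (1, 0),   # right
--     (-1, 0),  # left
-- ]
--
-- def bfs_ignore_walls_limited(mapp, start, max_steps):
--     rows, cols = len(mapp), len(mapp[0])
--     dist = [[None]*cols for _ in range(rows)]
--     queue = deque()
--     r0, c0 = start
--     dist[r0][c0] = 0
--     queue.append((r0, c0))
--     while queue:
--         r, c = queue.popleft()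
--         for dr, dc in DIRECTIONS:
--             nr, nc = r+dr, c+dc
--             if 0 <= nr < rows and 0 <= nc < cols:
--                 if dist[nr][nc] is None:
--                     new_cost = dist[r][c] + 1
--                     if new_cost <= max_steps:
--                         dist[nr][nc] = new_cost
--                         queue.append((nr, nc))
--     return dist
-- ===== SOURCE B (Python) =====
-- def bfs_ignore_walls_limited(mapp, start, max_steps):
--     rows, cols = len(mapp), len(mapp[0])
--     dist = [[None] * cols for _ in range(rows)]
--     r0, c0 = start
--     dist[r0][c0] = 0
--     frontier = [(r0, c0)]
--     d = 0
--     while frontier and d < max_steps: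
--         d += 1
--         nxt = []
--         for r, c in frontier:
--             for nr, nc in ((r, c + 1), (r, c - 1), (r + 1, c), (r - 1, c)):
--                 if 0 <= nr < rows and 0 <= nc < cols and dist[nr][nc] is None:
--                     dist[nr][nc] = d
--                     nxt.append((nr, nc))
--         frontier = nxt
--     return dist
-- ===== Notes on version B (the rewrite author's own statement) =====
-- stated objective: alternative
-- what changed: Replaces the deque-driven BFS (pop one cell, read its stored distance back from the grid, cap check per neighbour) by a level-synchronous BFS: one frontier list per distance level with a level counter, so distances are never read back from the grid and the cap is checked once per level; no deque.
import Mathlib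
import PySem

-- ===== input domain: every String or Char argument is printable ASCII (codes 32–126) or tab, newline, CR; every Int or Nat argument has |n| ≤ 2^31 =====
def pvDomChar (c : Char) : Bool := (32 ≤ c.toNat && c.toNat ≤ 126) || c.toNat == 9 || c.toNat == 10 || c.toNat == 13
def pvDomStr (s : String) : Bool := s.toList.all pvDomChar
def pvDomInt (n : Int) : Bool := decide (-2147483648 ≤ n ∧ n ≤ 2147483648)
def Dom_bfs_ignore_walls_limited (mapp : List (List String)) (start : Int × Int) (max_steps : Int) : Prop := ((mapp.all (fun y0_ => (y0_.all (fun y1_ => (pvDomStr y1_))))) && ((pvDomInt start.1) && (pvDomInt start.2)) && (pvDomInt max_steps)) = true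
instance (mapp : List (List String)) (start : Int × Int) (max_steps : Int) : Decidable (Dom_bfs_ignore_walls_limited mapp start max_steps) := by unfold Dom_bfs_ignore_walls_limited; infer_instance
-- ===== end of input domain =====

-- B re-implements A's deque BFS as a level-synchronous BFS (frontier lists and a level counter, no
-- deque and no per-neighbour distance read-back); equal return value on every input Pre_ admits.
-- A mutates nothing observable (it only reads mapp's lengths), so return-value equality is full equality.

-- ===== PORT A =====
-- Python's list-index resolution for an in-range index (-n <= i < n): negative indices count from the end.
def pvIdx (n : Nat) (i : Int) : Nat := (if i < 0 then i + n else i).toNat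

-- dist[r][c] (read). Out-of-range reads fall back to defaults ([] / none); under Pre_ every read the
-- Python performs is in range, so this is exact there.
def pvRead (dist : List (List (Option Int))) (r c : Int) : Option Int :=
  (dist.getD (pvIdx dist.length r) []).getD
    (pvIdx (dist.getD (pvIdx dist.length r) []).length c) none

-- dist[r][c] = v (write), with the same index resolution.
def pvWrite (dist : List (List (Option Int))) (r c : Int) (v : Option Int) : List (List (Option Int)) :=
  dist.modify (pvIdx dist.length r) (fun row => row.set (pvIdx row.length c) v)

def pvDirections : List (Int × Int) := [(0,1),(0,-1),(1,0),(-1,0)]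

-- body of the inner `for dr, dc in DIRECTIONS`; state = (dist, queue)
def pvStepA (rows cols max_steps r c : Int)
    (st : List (List (Option Int)) × List (Int × Int)) (dir : Int × Int) :
    List (List (Option Int)) × List (Int × Int) :=
  let nr := r + dir.1
  let nc := c + dir.2
  if 0 ≤ nr ∧ nr < rows ∧ 0 ≤ nc ∧ nc < cols then
    if pvRead st.1 nr nc = none then
      let new_cost := (pvRead st.1 r c).getD 0 + 1
      if new_cost ≤ max_steps then (pvWrite st.1 nr nc (some new_cost), st.2 ++ [(nr, nc)])
      else st
    else st
  else st

-- `while queue:` — each iteration pops the deque's head and expands it over the four directions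
def pvLoopA (rows cols max_steps : Int) :
    Nat → List (List (Option Int)) → List (Int × Int) → List (List (Option Int))
  | 0, dist, _ => dist
  | _+1, dist, [] => dist
  | fuel+1, dist, (r, c) :: queue =>
    let st := pvDirections.foldl (pvStepA rows cols max_steps r c) (dist, queue)
    pvLoopA rows cols max_steps fuel st.1 st.2

def bfs_ignore_walls_limited (mapp : List (List String)) (start : Int × Int) (max_steps : Int) : List (List (Option Int)) :=
  let rows : Int := mapp.length
  let cols : Int := (mapp.getD 0 []).length
  let dist0 := List.replicate mapp.length (List.replicate (mapp.getD 0 []).length (none : Option Int))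
  let dist1 := pvWrite dist0 start.1 start.2 (some 0)
  -- fuel: the loop pops one cell per iteration and every enqueue first overwrites a `none` cell, so it
  -- runs at most rows*cols + 1 iterations (proved below); the fuel is never exhausted under Pre_.
  pvLoopA rows cols max_steps (mapp.length * (mapp.getD 0 []).length + 2) dist1 [(start.1, start.2)]

-- ===== PORT B =====
def pvNeighbors (r c : Int) : List (Int × Int) := [(r, c+1), (r, c-1), (r+1, c), (r-1, c)]

-- body of B's innermost `for nr, nc in ...`: claim an unassigned in-bounds cell for level d
def pvVisit (rows cols d : Int)
    (st : List (List (Option Int)) × List (Int × Int)) (q : Int × Int) :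
    List (List (Option Int)) × List (Int × Int) :=
  if 0 ≤ q.1 ∧ q.1 < rows ∧ 0 ≤ q.2 ∧ q.2 < cols ∧ pvRead st.1 q.1 q.2 = none then
    (pvWrite st.1 q.1 q.2 (some d), st.2 ++ [q])
  else st

-- `for r, c in frontier:` body; state = (dist, nxt)
def pvStepB (rows cols d : Int)
    (st : List (List (Option Int)) × List (Int × Int)) (p : Int × Int) :
    List (List (Option Int)) × List (Int × Int) :=
  (pvNeighbors p.1 p.2).foldl (pvVisit rows cols d) st

-- `while frontier and d < max_steps:` — one iteration advances a whole distance level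
def pvLoopB (rows cols max_steps d : Int)
    (dist : List (List (Option Int))) (frontier : List (Int × Int)) : List (List (Option Int)) :=
  if h : frontier ≠ [] ∧ d < max_steps then
    let st := frontier.foldl (pvStepB rows cols (d+1)) (dist, [])
    pvLoopB rows cols max_steps (d+1) st.1 st.2
  else dist
termination_by (max_steps - d).toNat
decreasing_by omega

def bfs_ignore_walls_limited_alt (mapp : List (List String)) (start : Int × Int) (max_steps : Int) : List (List (Option Int)) :=
  let rows : Int := mapp.length
  let cols : Int := (mapp.getD 0 []).length
  let dist0 := List.replicate mapp.length (List.replicate (mapp.getD 0 []).length (none : Option Int))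
  let dist1 := pvWrite dist0 start.1 start.2 (some 0)
  pvLoopB rows cols max_steps 0 dist1 [(start.1, start.2)]

-- ===== PRECONDITION & SPEC =====
-- Pre_: exactly the inputs on which the Python A returns: a nonempty map and a start pair that is a
-- valid Python index pair for the rows×cols grid (negative in-range indices included — both programs
-- count them from the end, as Python does). Outside Pre_ A raises IndexError (mapp[0] on an empty map,
-- or dist[r0][c0] with an out-of-range index).
def Pre_bfs_ignore_walls_limited (mapp : List (List String)) (start : Int × Int) (max_steps : Int) : Prop :=
  mapp ≠ [] ∧
  -(mapp.length : Int) ≤ start.1 ∧ start.1 < (mapp.length : Int) ∧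
  -(((mapp.getD 0 []).length : Int)) ≤ start.2 ∧ start.2 < (((mapp.getD 0 []).length : Int))
instance (mapp : List (List String)) (start : Int × Int) (max_steps : Int) : Decidable (Pre_bfs_ignore_walls_limited mapp start max_steps) := by unfold Pre_bfs_ignore_walls_limited; infer_instance

def pvWitness_bfs_ignore_walls_limited : List (List String) × (Int × Int) × Int :=
  ([["a", "b"], ["c", "d"]], (0, 1), 2)

def Spec_bfs_ignore_walls_limited (mapp : List (List String)) (start : Int × Int) (max_steps : Int) (out : List (List (Option Int))) : Prop := out = bfs_ignore_walls_limited_alt mapp start max_steps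
instance (mapp : List (List String)) (start : Int × Int) (max_steps : Int) (out : List (List (Option Int))) : Decidable (Spec_bfs_ignore_walls_limited mapp start max_steps out) := by unfold Spec_bfs_ignore_walls_limited; infer_instance

-- ===== CLAIM (what is proved, stated in full; the proofs are below) =====
def Claim_equal_bfs_ignore_walls_limited : Prop := ∀ (mapp : List (List String)) (start : Int × Int) (max_steps : Int), Dom_bfs_ignore_walls_limited mapp start max_steps → Pre_bfs_ignore_walls_limited mapp start max_steps → Spec_bfs_ignore_walls_limited mapp start max_steps (bfs_ignore_walls_limited mapp start max_steps)

-- ===== LEMMAS AND PROOFS =====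
-- count of unassigned cells: the loops' potential
def pvNones (dist : List (List (Option Int))) : Nat :=
  (dist.map (fun row => row.countP (fun o => o = none))).sum

-- the grid keeps its rows×cols shape throughout
def pvShape (dist : List (List (Option Int))) (rows cols : Int) : Prop :=
  (dist.length : Int) = rows ∧ ∀ row ∈ dist, (row.length : Int) = cols

theorem pvIdx_lt {n : Nat} {i lim : Int} (h1 : -lim ≤ i) (h2 : i < lim) (hn : (n : Int) = lim) :
    pvIdx n i < n := by unfold pvIdx; split <;> omega

theorem pvWrite_getD (dist : List (List (Option Int))) (r c : Int) (v : Option Int) (j : Nat) :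
    (pvWrite dist r c v).getD j [] =
      if pvIdx dist.length r = j then (dist.getD j []).set (pvIdx (dist.getD j []).length c) v
      else dist.getD j [] := by
  simp only [pvWrite, List.getD_eq_getElem?_getD, List.getElem?_modify]
  cases h : dist[j]? with
  | none => simp
  | some row => simp

theorem pvWrite_length (dist : List (List (Option Int))) (r c : Int) (v : Option Int) :
    (pvWrite dist r c v).length = dist.length := by
  simp [pvWrite]

theorem pvGetD_mem {dist : List (List (Option Int))} {j : Nat} (hj : j < dist.length) :
    dist.getD j [] ∈ dist := by
  rw [List.getD_eq_getElem _ _ hj]; exact List.getElem_mem hj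

theorem pvShape_pvWrite {dist : List (List (Option Int))} {rows cols : Int} (h : pvShape dist rows cols)
    (r c : Int) (v : Option Int) : pvShape (pvWrite dist r c v) rows cols := by
  obtain ⟨h1, h2⟩ := h
  refine ⟨by rw [pvWrite_length]; exact h1, ?_⟩
  intro row hrow
  rw [List.mem_iff_getElem] at hrow
  obtain ⟨j, hj, rfl⟩ := hrow
  rw [pvWrite_length] at hj
  have hgd := pvWrite_getD dist r c v j
  rw [List.getD_eq_getElem _ _ (by rwa [pvWrite_length])] at hgd
  rw [hgd]
  split
  · rw [List.length_set]; exact h2 _ (pvGetD_mem hj)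
  · exact h2 _ (pvGetD_mem hj)

theorem pvRead_pvWrite_preserve {dist : List (List (Option Int))} {a b x y : Int} {v : Int}
    (hn : pvRead dist a b = none) (hv : pvRead dist x y = some v) (w : Option Int) :
    pvRead (pvWrite dist a b w) x y = some v := by
  unfold pvRead at *
  simp only [pvWrite_length]
  rw [pvWrite_getD]
  by_cases hax : pvIdx dist.length a = pvIdx dist.length x
  · rw [if_pos hax]
    rw [hax] at hn
    simp only [List.length_set]
    by_cases hby : pvIdx (dist.getD (pvIdx dist.length x) []).length b
        = pvIdx (dist.getD (pvIdx dist.length x) []).length y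
    · rw [hby] at hn; rw [hn] at hv; exact absurd hv (by simp)
    · rw [List.getD_eq_getElem?_getD, List.getElem?_set_ne hby, ← List.getD_eq_getElem?_getD]
      exact hv
  · rw [if_neg hax]; exact hv

theorem pvRead_pvWrite_self {dist : List (List (Option Int))} {rows cols a b : Int}
    (hs : pvShape dist rows cols) (ha : -rows ≤ a) (ha' : a < rows) (hb : -cols ≤ b) (hb' : b < cols)
    (w : Option Int) : pvRead (pvWrite dist a b w) a b = w := by
  obtain ⟨h1, h2⟩ := hs
  have hia : pvIdx dist.length a < dist.length := pvIdx_lt (by omega) ha' h1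
  have hlen : ((dist.getD (pvIdx dist.length a) []).length : Int) = cols :=
    h2 _ (pvGetD_mem hia)
  have hjb : pvIdx (dist.getD (pvIdx dist.length a) []).length b
      < (dist.getD (pvIdx dist.length a) []).length := pvIdx_lt (by omega) hb' hlen
  unfold pvRead
  simp only [pvWrite_length]
  rw [pvWrite_getD, if_pos rfl]
  simp only [List.length_set]
  rw [List.getD_eq_getElem?_getD, List.getElem?_set_self hjb]
  rfl

theorem countP_set_lt : ∀ (row : List (Option Int)) (j : Nat) (v : Int),
    row.getD j none = none → j < row.length →
    (row.set j (some v)).countP (fun o => o = none) < row.countP (fun o => o = none) := by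
  intro row
  induction row with
  | nil => intro j v _ h; simp at h
  | cons x xs ih =>
    intro j v hget hlt
    cases j with
    | zero =>
      simp only [List.getD_cons_zero] at hget
      subst hget
      simp [List.countP_cons]
    | succ j =>
      simp only [List.getD_cons_succ] at hget
      simp only [List.length_cons, Nat.add_lt_add_iff_right] at hlt
      simp only [List.set_cons_succ, List.countP_cons]
      have := ih j v hget hlt
      omega

theorem pvNones_modify_lt : ∀ (l : List (List (Option Int))) (i : Nat)
    (F : List (Option Int) → List (Option Int)), i < l.length →
    (F (l.getD i [])).countP (fun o => o = none) < (l.getD i []).countP (fun o => o = none) →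
    pvNones (l.modify i F) < pvNones l := by
  intro l
  induction l with
  | nil => intro i F h; simp at h
  | cons x xs ih =>
    intro i F hi hlt
    cases i with
    | zero =>
      rw [List.modify_zero_cons]
      simp only [List.getD_cons_zero] at hlt
      simp only [pvNones, List.map_cons, List.sum_cons]
      omega
    | succ i =>
      simp only [List.length_cons, Nat.add_lt_add_iff_right] at hi
      simp only [List.getD_cons_succ] at hlt
      have := ih i F hi hlt
      rw [List.modify_succ_cons]
      simp only [pvNones, List.map_cons, List.sum_cons] at *
      omega

theorem pvNones_pvWrite {dist : List (List (Option Int))} {rows cols a b : Int}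
    (hs : pvShape dist rows cols) (ha : 0 ≤ a) (ha' : a < rows) (hb : 0 ≤ b) (hb' : b < cols)
    (hn : pvRead dist a b = none) (v : Int) :
    pvNones (pvWrite dist a b (some v)) < pvNones dist := by
  obtain ⟨h1, h2⟩ := hs
  have hia : pvIdx dist.length a < dist.length := pvIdx_lt (by omega) ha' h1
  have hlen : ((dist.getD (pvIdx dist.length a) []).length : Int) = cols :=
    h2 _ (pvGetD_mem hia)
  have hjb : pvIdx (dist.getD (pvIdx dist.length a) []).length b
      < (dist.getD (pvIdx dist.length a) []).length := pvIdx_lt (by omega) hb' hlen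
  unfold pvWrite
  apply pvNones_modify_lt _ _ _ hia
  exact countP_set_lt _ _ _ hn hjb

theorem pvNones_le_aux : ∀ (dist : List (List (Option Int))) (C : Nat),
    (∀ row ∈ dist, row.length = C) → pvNones dist ≤ dist.length * C := by
  intro dist C
  induction dist with
  | nil => intro; simp [pvNones]
  | cons x xs ih =>
    intro h
    have hx : x.countP (fun o => (o = none : Bool)) ≤ C := by
      rw [← h x List.mem_cons_self]; exact List.countP_le_length
    have := ih (fun row hr => h row (List.mem_cons_of_mem _ hr))
    simp only [pvNones, List.map_cons, List.sum_cons, List.length_cons] at *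
    calc x.countP (fun o => decide (o = none)) + (xs.map fun row => row.countP fun o => decide (o = none)).sum
        ≤ C + xs.length * C := by omega
      _ = (xs.length + 1) * C := by ring

theorem pvNones_le {dist : List (List (Option Int))} {rows cols : Int} (hs : pvShape dist rows cols) :
    (pvNones dist : Int) ≤ rows * cols := by
  obtain ⟨h1, h2⟩ := hs
  cases dist with
  | nil => simp [pvNones] at *; subst h1; simp
  | cons x xs =>
    have hc : (x.length : Int) = cols := h2 x List.mem_cons_self
    have hle : pvNones (x :: xs) ≤ (x :: xs).length * x.length := by
      apply pvNones_le_aux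
      intro row hr
      have := h2 row hr
      omega
    calc (pvNones (x :: xs) : Int) ≤ ((x :: xs).length * x.length : Nat) := by exact_mod_cast hle
      _ = rows * cols := by push_cast; rw [h1, hc]

theorem pvVisit_preserve {rows cols d : Int} {st : List (List (Option Int)) × List (Int × Int)}
    {x y : Int} {v : Int} (hv : pvRead st.1 x y = some v) (q : Int × Int) :
    pvRead (pvVisit rows cols d st q).1 x y = some v := by
  unfold pvVisit
  split
  · exact pvRead_pvWrite_preserve (by tauto) hv _
  · exact hv

theorem foldl_pvVisit_preserve {rows cols d : Int} {x y : Int} {v : Int} :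
    ∀ (ns : List (Int × Int)) (st : List (List (Option Int)) × List (Int × Int)),
    pvRead st.1 x y = some v → pvRead (ns.foldl (pvVisit rows cols d) st).1 x y = some v := by
  intro ns
  induction ns with
  | nil => intro st hv; exact hv
  | cons n tl ih => intro st hv; exact ih _ (pvVisit_preserve hv n)

theorem foldl_pvVisit_queue (rows cols d : Int) :
    ∀ (ns : List (Int × Int)) (dist : List (List (Option Int))) (q : List (Int × Int)),
    ns.foldl (pvVisit rows cols d) (dist, q) =
      ((ns.foldl (pvVisit rows cols d) (dist, [])).1,
        q ++ (ns.foldl (pvVisit rows cols d) (dist, [])).2) := by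
  intro ns
  induction ns with
  | nil => intro dist q; simp
  | cons n tl ih =>
    intro dist q
    simp only [List.foldl_cons]
    by_cases hc : 0 ≤ n.1 ∧ n.1 < rows ∧ 0 ≤ n.2 ∧ n.2 < cols ∧ pvRead dist n.1 n.2 = none
    · rw [show pvVisit rows cols d (dist, q) n
            = (pvWrite dist n.1 n.2 (some d), q ++ [n]) by simp [pvVisit, hc],
          show pvVisit rows cols d (dist, []) n
            = (pvWrite dist n.1 n.2 (some d), [n]) by simp [pvVisit, hc]]
      rw [ih _ (q ++ [n]), ih _ [n]]
      simp
    · rw [show pvVisit rows cols d (dist, q) n = (dist, q) by simp [pvVisit, hc],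
          show pvVisit rows cols d (dist, []) n = (dist, []) by simp [pvVisit, hc]]
      exact ih _ _

theorem foldl_pvVisit_inv {rows cols : Int} (d : Int) :
    ∀ (ns : List (Int × Int)) (dist : List (List (Option Int))) (q : List (Int × Int)),
    pvShape dist rows cols →
    (∀ p ∈ q, pvRead dist p.1 p.2 = some d) →
    pvShape (ns.foldl (pvVisit rows cols d) (dist, q)).1 rows cols ∧
    (∀ p ∈ (ns.foldl (pvVisit rows cols d) (dist, q)).2,
        pvRead (ns.foldl (pvVisit rows cols d) (dist, q)).1 p.1 p.2 = some d) ∧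
    (ns.foldl (pvVisit rows cols d) (dist, q)).2.length +
        pvNones (ns.foldl (pvVisit rows cols d) (dist, q)).1 ≤ q.length + pvNones dist := by
  intro ns
  induction ns with
  | nil => intro dist q hs hq; exact ⟨hs, hq, le_refl _⟩
  | cons n tl ih =>
    intro dist q hs hq
    simp only [List.foldl_cons]
    by_cases hc : 0 ≤ n.1 ∧ n.1 < rows ∧ 0 ≤ n.2 ∧ n.2 < cols ∧ pvRead dist n.1 n.2 = none
    · rw [show pvVisit rows cols d (dist, q) n
            = (pvWrite dist n.1 n.2 (some d), q ++ [n]) by simp [pvVisit, hc]]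
      obtain ⟨hc1, hc2, hc3, hc4, hc5⟩ := hc
      have hrows0 : 0 ≤ rows := by have := hs.1; omega
      have hcols0 : 0 ≤ cols := by
        have := hs.2
        by_cases hd : dist.length = 0
        · omega
        · have hlen := hs.2 _ (pvGetD_mem (j := 0) (by omega))
          omega
      have hs' : pvShape (pvWrite dist n.1 n.2 (some d)) rows cols := pvShape_pvWrite hs _ _ _
      have hq' : ∀ p ∈ q ++ [n], pvRead (pvWrite dist n.1 n.2 (some d)) p.1 p.2 = some d := by
        intro p hp
        rcases List.mem_append.mp hp with hp | hp
        · exact pvRead_pvWrite_preserve hc5 (hq p hp) _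
        · simp at hp; subst hp
          exact pvRead_pvWrite_self hs (by omega) hc2 (by omega) hc4 _
      have hn' := pvNones_pvWrite hs hc1 hc2 hc3 hc4 hc5 d
      obtain ⟨ih1, ih2, ih3⟩ := ih _ _ hs' hq'
      refine ⟨ih1, ih2, ?_⟩
      simp only [List.length_append, List.length_cons, List.length_nil] at *
      omega
    · rw [show pvVisit rows cols d (dist, q) n = (dist, q) by simp [pvVisit, hc]]
      exact ih _ _ hs hq

theorem pvStepA_eq_pvVisit {rows cols ms r c d : Int} {dist : List (List (Option Int))}
    {q : List (Int × Int)}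
    (hread : pvRead dist r c = some d) (hcap : d + 1 ≤ ms) (dir : Int × Int) :
    pvStepA rows cols ms r c (dist, q) dir = pvVisit rows cols (d+1) (dist, q) (r + dir.1, c + dir.2) := by
  simp only [pvStepA, pvVisit, hread]
  simp only [Option.getD_some]
  by_cases h1 : 0 ≤ r + dir.1 ∧ r + dir.1 < rows ∧ 0 ≤ c + dir.2 ∧ c + dir.2 < cols
  · by_cases h2 : pvRead dist (r + dir.1) (c + dir.2) = none
    · simp [h1, h2, hcap]
    · simp [h1, h2]
  · rw [if_neg h1, if_neg (by tauto)]

theorem foldl_pvStepA_eq {rows cols ms r c d : Int} (hcap : d + 1 ≤ ms) :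
    ∀ (ds : List (Int × Int)) (dist : List (List (Option Int))) (q : List (Int × Int)),
    pvRead dist r c = some d →
    ds.foldl (pvStepA rows cols ms r c) (dist, q) =
      (ds.map (fun dd => (r + dd.1, c + dd.2))).foldl (pvVisit rows cols (d+1)) (dist, q) := by
  intro ds
  induction ds with
  | nil => intro dist q _; rfl
  | cons dd tl ih =>
    intro dist q hread
    simp only [List.foldl_cons, List.map_cons]
    rw [pvStepA_eq_pvVisit hread hcap dd]
    have hread' : pvRead (pvVisit rows cols (d+1) (dist, q) (r + dd.1, c + dd.2)).1 r c = some d :=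
      pvVisit_preserve hread _
    rcases hst : pvVisit rows cols (d+1) (dist, q) (r + dd.1, c + dd.2) with ⟨dist', q'⟩
    rw [hst] at hread'
    exact ih dist' q' hread'

theorem pvNeighbors_eq_map (r c : Int) :
    pvDirections.map (fun dd => (r + dd.1, c + dd.2)) = pvNeighbors r c := by
  simp [pvDirections, pvNeighbors]
  constructor <;> ring

theorem foldl_pvStepA_id {rows cols ms r c d : Int} (hcap : ¬ d + 1 ≤ ms) :
    ∀ (ds : List (Int × Int)) (dist : List (List (Option Int))) (q : List (Int × Int)),
    pvRead dist r c = some d →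
    ds.foldl (pvStepA rows cols ms r c) (dist, q) = (dist, q) := by
  intro ds
  induction ds with
  | nil => intro dist q _; rfl
  | cons dd tl ih =>
    intro dist q hread
    simp only [List.foldl_cons]
    rw [show pvStepA rows cols ms r c (dist, q) dd = (dist, q) by
      simp only [pvStepA, hread, Option.getD_some]
      split_ifs <;> rfl]
    exact ih dist q hread

-- the invariant tying A's queue state (current level's tail `pending`, next level's prefix `nxt`) to B
def pvInv (rows cols ms : Int) (fuel : Nat) (d : Int) (dist : List (List (Option Int)))
    (pending nxt : List (Int × Int)) : Prop :=
  pvShape dist rows cols ∧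
  (∀ p ∈ pending, pvRead dist p.1 p.2 = some d) ∧
  (∀ p ∈ nxt, pvRead dist p.1 p.2 = some (d+1)) ∧
  (nxt ≠ [] → d + 1 ≤ ms) ∧
  pending.length + nxt.length + pvNones dist < fuel

-- what is proved about every such state: A's remaining run equals B's remaining run
def pvGoal (rows cols ms : Int) (fuel : Nat) (d : Int) (dist : List (List (Option Int)))
    (pending nxt : List (Int × Int)) : Prop :=
  pvLoopA rows cols ms fuel dist (pending ++ nxt) =
    if d + 1 ≤ ms then
      pvLoopB rows cols ms (d+1)
        (pending.foldl (pvStepB rows cols (d+1)) (dist, nxt)).1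
        (pending.foldl (pvStepB rows cols (d+1)) (dist, nxt)).2
    else dist

-- re-partitioning at a level boundary: pending exhausted, the accumulated next level becomes current
theorem pvRepart {rows cols ms d : Int} {dist : List (List (Option Int))}
    {nxt : List (Int × Int)} (hcap : d + 1 ≤ ms) :
    (if d + 1 ≤ ms then pvLoopB rows cols ms (d+1) dist nxt else dist) =
      (if d + 1 + 1 ≤ ms then
        pvLoopB rows cols ms (d+1+1)
          (nxt.foldl (pvStepB rows cols (d+1+1)) (dist, [])).1
          (nxt.foldl (pvStepB rows cols (d+1+1)) (dist, [])).2
       else dist) := by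
  rw [if_pos hcap]
  by_cases hn : nxt = []
  · subst hn
    rw [pvLoopB]
    simp only [ne_eq, not_true_eq_false, false_and, dite_false, List.foldl_nil]
    split_ifs with h2
    · rw [pvLoopB]; simp
    · rfl
  · rw [pvLoopB]
    by_cases h2 : d + 1 + 1 ≤ ms
    · rw [dif_pos ⟨hn, by omega⟩, if_pos h2]
    · rw [dif_neg (fun hh => h2 (by omega)), if_neg h2]

theorem pvMainCons (rows cols ms : Int) (f : Nat)
    (IH : ∀ d dist pending nxt, pvInv rows cols ms f d dist pending nxt →
            pvGoal rows cols ms f d dist pending nxt) :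
    ∀ d dist (p : Int × Int) rest nxt,
      pvInv rows cols ms (f+1) d dist (p :: rest) nxt →
      pvGoal rows cols ms (f+1) d dist (p :: rest) nxt := by
  intro d dist p rest nxt hinv
  obtain ⟨hsh, h1, h2, hcapn, hf⟩ := hinv
  obtain ⟨pr, pc⟩ := p
  have hp : pvRead dist pr pc = some d := h1 (pr, pc) List.mem_cons_self
  unfold pvGoal
  simp only [List.cons_append, pvLoopA]
  by_cases hcap : d + 1 ≤ ms
  · rw [foldl_pvStepA_eq hcap pvDirections dist (rest ++ nxt) hp, pvNeighbors_eq_map,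
        foldl_pvVisit_queue]
    obtain ⟨hEsh, hEreads, hEcount⟩ :=
      foldl_pvVisit_inv (d+1) (pvNeighbors pr pc) dist [] hsh (by simp)
    have hIH := IH d (((pvNeighbors pr pc).foldl (pvVisit rows cols (d+1)) (dist, [])).1)
      rest (nxt ++ ((pvNeighbors pr pc).foldl (pvVisit rows cols (d+1)) (dist, [])).2) ?_
    · unfold pvGoal at hIH
      rw [List.append_assoc, hIH]
      rw [if_pos hcap, if_pos hcap]
      rw [List.foldl_cons,
          show pvStepB rows cols (d+1) (dist, nxt) (pr, pc)
            = (((pvNeighbors pr pc).foldl (pvVisit rows cols (d+1)) (dist, [])).1,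
               nxt ++ ((pvNeighbors pr pc).foldl (pvVisit rows cols (d+1)) (dist, [])).2) from by
        unfold pvStepB
        exact foldl_pvVisit_queue rows cols (d+1) (pvNeighbors pr pc) dist nxt]
    · refine ⟨hEsh, ?_, ?_, fun _ => hcap, ?_⟩
      · intro x hx
        exact foldl_pvVisit_preserve _ (dist, []) (h1 x (List.mem_cons_of_mem _ hx))
      · intro x hx
        rcases List.mem_append.mp hx with hx | hx
        · exact foldl_pvVisit_preserve _ (dist, []) (h2 x hx)
        · exact hEreads x hx
      · have := hEcount
        simp only [List.length_nil, List.length_cons, List.length_append] at *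
        omega
  · have hnx : nxt = [] := by
      by_contra hnx
      exact hcap (hcapn hnx)
    subst hnx
    rw [foldl_pvStepA_id hcap pvDirections dist (rest ++ []) hp]
    have hIH := IH d dist rest [] ⟨hsh, fun x hx => h1 x (List.mem_cons_of_mem _ hx),
      by simp, fun h => absurd rfl h, by simp only [List.length_cons, List.length_nil] at hf ⊢; omega⟩
    unfold pvGoal at hIH
    rw [hIH, if_neg hcap, if_neg hcap]

theorem pvMain (rows cols ms : Int) :
    ∀ (fuel : Nat) (d : Int) dist pending nxt,
    pvInv rows cols ms fuel d dist pending nxt → pvGoal rows cols ms fuel d dist pending nxt := by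
  intro fuel
  induction fuel with
  | zero => intro d dist pending nxt hinv; exact absurd hinv.2.2.2.2 (by omega)
  | succ f IHf =>
    intro d dist pending nxt hinv
    cases pending with
    | cons p rest => exact pvMainCons rows cols ms f IHf d dist p rest nxt hinv
    | nil =>
      obtain ⟨hsh, h1, h2, hcapn, hf⟩ := hinv
      cases nxt with
      | nil =>
        unfold pvGoal
        simp only [List.nil_append, List.foldl_nil, pvLoopA]
        split_ifs with hcap
        · rw [pvLoopB]; simp
        · rfl
      | cons n0 nr =>
        have hcap : d + 1 ≤ ms := hcapn (by simp)
        unfold pvGoal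
        simp only [List.nil_append, List.foldl_nil]
        rw [pvRepart hcap]
        have hcons := pvMainCons rows cols ms f IHf (d+1) dist n0 nr []
          ⟨hsh, fun x hx => h2 x hx, by simp, fun h => absurd rfl h,
           by simp only [List.length_cons, List.length_nil] at hf ⊢; omega⟩
        unfold pvGoal at hcons
        simp only [List.append_nil] at hcons
        exact hcons

theorem pvAgree (mapp : List (List String)) (start : Int × Int) (max_steps : Int)
    (hpre : Pre_bfs_ignore_walls_limited mapp start max_steps) :
    bfs_ignore_walls_limited mapp start max_steps = bfs_ignore_walls_limited_alt mapp start max_steps := by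
  obtain ⟨hne, ha, ha', hb, hb'⟩ := hpre
  show pvLoopA (mapp.length : Int) ((mapp.getD 0 []).length : Int) max_steps
      (mapp.length * (mapp.getD 0 []).length + 2)
      (pvWrite (List.replicate mapp.length (List.replicate (mapp.getD 0 []).length (none : Option Int)))
        start.1 start.2 (some 0)) [(start.1, start.2)]
    = pvLoopB (mapp.length : Int) ((mapp.getD 0 []).length : Int) max_steps 0
      (pvWrite (List.replicate mapp.length (List.replicate (mapp.getD 0 []).length (none : Option Int)))
        start.1 start.2 (some 0)) [(start.1, start.2)]
  set rows : Int := (mapp.length : Int) with hrows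
  set cols : Int := ((mapp.getD 0 []).length : Int) with hcols
  set dist0 := List.replicate mapp.length (List.replicate (mapp.getD 0 []).length (none : Option Int)) with hdist0
  set dist1 := pvWrite dist0 start.1 start.2 (some 0) with hdist1
  have hsh0 : pvShape dist0 rows cols := by
    constructor
    · rw [hdist0]; simp only [List.length_replicate]; exact hrows.symm
    · intro row hrow
      rw [hdist0, List.mem_replicate] at hrow
      rw [hrow.2]
      simp only [List.length_replicate]
      exact hcols.symm
  have hsh1 : pvShape dist1 rows cols := pvShape_pvWrite hsh0 _ _ _
  have hread1 : pvRead dist1 start.1 start.2 = some 0 :=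
    pvRead_pvWrite_self hsh0 ha ha' hb hb' (some 0)
  have hfuel : ([(start.1, start.2)].length + ([] : List (Int × Int)).length + pvNones dist1)
      < mapp.length * (mapp.getD 0 []).length + 2 := by
    have hN : pvNones dist1 ≤ mapp.length * (mapp.getD 0 []).length := by
      have := pvNones_le hsh1
      rw [hrows, hcols] at this
      exact_mod_cast this
    simp only [List.length_cons, List.length_nil]
    omega
  have hmain := pvMain rows cols max_steps (mapp.length * (mapp.getD 0 []).length + 2)
    0 dist1 [(start.1, start.2)] []
    ⟨hsh1, by intro p hp; simp at hp; subst hp; exact hread1, by simp,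
     fun h => absurd rfl h, hfuel⟩
  unfold pvGoal at hmain
  simp only [List.append_nil] at hmain
  rw [hmain]
  conv_rhs => rw [pvLoopB]
  by_cases hm : (0 : Int) + 1 ≤ max_steps
  · rw [if_pos hm, dif_pos (⟨by simp, by omega⟩ : ([(start.1, start.2)] : List (Int × Int)) ≠ [] ∧ (0:Int) < max_steps)]
  · rw [if_neg hm, dif_neg (fun hh => hm (by omega : (0:Int) + 1 ≤ max_steps))]

-- ===== VERDICT (by name: the statement is the Claim_ definition above) =====
theorem bfs_ignore_walls_limited_spec : Claim_equal_bfs_ignore_walls_limited := by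
  intro mapp start max_steps _ hpre
  unfold Spec_bfs_ignore_walls_limited
  exact pvAgree mapp start max_steps hpre
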